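-- pv_equiv track=rewrite | github.com/lioil1020-JackLee/LineBot | src/linebot_app/services/grounded_reply_service.py | _is_generic_lookup_source_allowed
-- ===== SOURCE A (Python) =====
-- _GENERAL_LOOKUP_BLOCKED_DOMAINS = (
--     "zhihu.com",
-- )
--
-- def _is_generic_lookup_source_allowed(url: str) -> bool:
--     host = url.split("://", 1)[-1].split("/", 1)[0].lower()
--     if not host:
--         return False
--     return not any(
--         host == domain or host.endswith(f".{domain}")
--         for domain in _GENERAL_LOOKUP_BLOCKED_DOMAINS
--     )
-- ===== SOURCE B (Python) =====
-- _GENERAL_LOOKUP_BLOCKED_DOMAINS = (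
--     "zhihu.com",
-- )
--
-- _BLOCKED_SET = frozenset(_GENERAL_LOOKUP_BLOCKED_DOMAINS)
--
--
-- def _is_generic_lookup_source_allowed(url: str) -> bool:
--     host = url.split("://", 1)[-1].split("/", 1)[0].lower()
--     if not host:
--         return False
--     # candidate matches: the host itself and every dot-suffix of the host
--     candidates = [host] + [host[i + 1:] for i, ch in enumerate(host) if ch == "."]
--     return _BLOCKED_SET.isdisjoint(candidates)
-- ===== Notes on version B (the rewrite author's own statement) =====
-- stated objective: idiomatic
-- what changed: A scans the blocklist testing equality/endswith against the host; B builds the host's dot-suffix candidates once and tests set disjointness against a frozenset of blocked domains, iterating over the host instead of the blocklist.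
import Mathlib
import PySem

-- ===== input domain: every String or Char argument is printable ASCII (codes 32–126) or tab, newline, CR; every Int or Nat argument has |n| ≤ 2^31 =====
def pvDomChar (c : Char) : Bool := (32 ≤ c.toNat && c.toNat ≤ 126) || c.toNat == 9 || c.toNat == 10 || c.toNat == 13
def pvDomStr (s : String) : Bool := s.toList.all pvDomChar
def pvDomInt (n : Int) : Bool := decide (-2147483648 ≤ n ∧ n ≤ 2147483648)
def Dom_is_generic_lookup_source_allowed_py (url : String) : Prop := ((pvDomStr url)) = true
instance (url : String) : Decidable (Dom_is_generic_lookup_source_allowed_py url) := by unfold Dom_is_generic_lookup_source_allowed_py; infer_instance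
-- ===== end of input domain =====

-- B replaces A's blocklist scan with endswith by a set-disjointness test of the blocked set
-- against the host's own dot-suffixes (idiomatic; host extraction kept identical; return value only).

-- shared helper: the identical first line of both Pythons,
-- host = url.split("://", 1)[-1].split("/", 1)[0].lower(), as a list of chars
def pvHostChars (url : String) : List Char :=
  let afterScheme := ((PySem.Str.splitMax? url "://" 1).getD []).getLastD ""
  let beforeSlash := ((PySem.Str.splitMax? afterScheme "/" 1).getD []).headD ""
  PySem.Chars.lower beforeSlash.toList

-- ===== PORT A =====
def pvBlocked : List (List Char) := ["zhihu.com".toList]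

def is_generic_lookup_source_allowed_py (url : String) : Bool :=
  let host := pvHostChars url
  if host = [] then false
  else !(pvBlocked.any (fun domain =>
    host == domain || PySem.Chars.endswith host ('.' :: domain)))

-- ===== PORT B =====
def pvBlockedSet : PySem.Set (List Char) := PySem.Set.ofList ["zhihu.com".toList]

def is_generic_lookup_source_allowed_py_alt (url : String) : Bool :=
  let host := pvHostChars url
  if host = [] then false
  else
    -- candidates = [host] + [host[i+1:] for i, ch in enumerate(host) if ch == "."]
    let candidates := host :: (PySem.List.enumerate host).filterMap
      (fun p => if p.2 = '.' then some (PySem.List.slice host (some (p.1 + 1))) else none)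
    PySem.Set.isdisjoint pvBlockedSet (PySem.Set.ofList candidates)

-- ===== PRECONDITION & SPEC =====
def Spec_is_generic_lookup_source_allowed_py (url : String) (out : Bool) : Prop := out = is_generic_lookup_source_allowed_py_alt url
instance (url : String) (out : Bool) : Decidable (Spec_is_generic_lookup_source_allowed_py url out) := by unfold Spec_is_generic_lookup_source_allowed_py; infer_instance

-- ===== CLAIM (what is proved, stated in full; the proofs are below) =====
def Claim_equal_is_generic_lookup_source_allowed_py : Prop := ∀ (url : String), Dom_is_generic_lookup_source_allowed_py url → Spec_is_generic_lookup_source_allowed_py url (is_generic_lookup_source_allowed_py url)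

-- ===== LEMMAS AND PROOFS =====

-- a dotted suffix of cs is exactly the part of cs after some '.' occurring in cs
lemma endswith_dot_iff (cs t : List Char) :
    ('.' :: t) <:+ cs ↔ ∃ (k : Nat), ∃ (_ : k < cs.length), cs[k] = '.' ∧ cs.drop (k + 1) = t := by
  constructor
  · rintro ⟨u, hu⟩
    have hk : u.length < cs.length := by subst hu; simp [List.length_append]
    have hdrop : cs.drop u.length = '.' :: t := by subst hu; simp
    have h2 := List.drop_eq_getElem_cons hk
    rw [hdrop] at h2
    exact ⟨u.length, hk, (List.cons.injEq _ _ _ _ ▸ h2).1.symm, ((List.cons.injEq _ _ _ _ ▸ h2).2).symm⟩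
  · rintro ⟨k, hk, hdot, hdrop⟩
    have : cs.drop k = '.' :: t := by rw [List.drop_eq_getElem_cons hk, hdot, hdrop]
    exact this ▸ List.drop_suffix k cs

-- the same fact phrased on the B side's slice
lemma endswith_slice_iff (cs t : List Char) :
    PySem.Chars.endswith cs ('.' :: t) = true ↔
      ∃ (k : Nat), ∃ (_ : k < cs.length), cs[k] = '.' ∧
        PySem.List.slice cs (some ((k : Int) + 1)) = t := by
  rw [PySem.Chars.endswith_iff, endswith_dot_iff]
  refine exists_congr fun k => exists_congr fun hk => and_congr_right fun _ => ?_
  rw [PySem.List.slice_from cs (by positivity : (0:Int) ≤ (k:Int)+1)]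
  have : ((k : Int) + 1).toNat = k + 1 := by omega
  rw [this]

-- the nonempty-host case: A's blocklist test agrees with B's disjointness test
lemma blocked_eq_disjoint (host : List Char) :
    (!(pvBlocked.any (fun domain =>
      host == domain || PySem.Chars.endswith host ('.' :: domain)))) =
    PySem.Set.isdisjoint pvBlockedSet
      (PySem.Set.ofList (host :: (PySem.List.enumerate host).filterMap
        (fun p => if p.2 = '.' then some (PySem.List.slice host (some (p.1 + 1))) else none))) := by
  rw [Bool.eq_iff_iff]
  simp only [pvBlocked, pvBlockedSet, List.any_cons, List.any_nil, Bool.or_false,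
    Bool.not_eq_true', Bool.or_eq_false_iff, PySem.Set.isdisjoint_iff, PySem.Set.mem_ofList,
    beq_eq_false_iff_ne, ne_eq, List.mem_cons, List.mem_filterMap, PySem.List.mem_enumerate_iff]
  constructor
  · rintro ⟨hne, hend⟩ x hx
    rcases hx with rfl | hx
    · rintro (rfl | ⟨⟨i, c⟩, ⟨k, hk, hkc⟩, hif⟩)
      · exact hne rfl
      · cases Prod.mk.injEq .. ▸ hkc with
        | intro hi hc =>
          by_cases hdot : c = '.'
          · rw [hi] at hif
            simp [hdot] at hif
            have : PySem.Chars.endswith host ('.' :: "zhihu.com".toList) = true := by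
              rw [endswith_slice_iff]
              exact ⟨k, hk, hc.symm ▸ hdot, by simpa using hif⟩
            rw [hend] at this; cases this
          · simp [hdot] at hif
    · cases hx
  · intro hall
    have h := hall "zhihu.com".toList (Or.inl rfl)
    push Not at h
    obtain ⟨h1, h2⟩ := h
    refine ⟨fun he => h1 he.symm, ?_⟩
    by_contra hend
    rw [Bool.not_eq_false, endswith_slice_iff] at hend
    obtain ⟨k, hk, hdot, hsl⟩ := hend
    exact (h2 ((0 : Int) + (k : Int), host[k]) ⟨k, hk, rfl⟩ (by simp [hdot, zero_add, hsl])).elim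

-- ===== VERDICT (by name: the statement is the Claim_ definition above) =====
theorem is_generic_lookup_source_allowed_py_spec : Claim_equal_is_generic_lookup_source_allowed_py := by
  intro url _
  unfold Spec_is_generic_lookup_source_allowed_py
  unfold is_generic_lookup_source_allowed_py is_generic_lookup_source_allowed_py_alt
  by_cases h0 : pvHostChars url = []
  · simp [h0]
  · simp only [if_neg h0]
    exact blocked_eq_disjoint (pvHostChars url)
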